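-- pv_equiv track=rewrite | github.com/hollden/adaptive_python | Koch curve.py | koch_turns
-- ===== SOURCE A (Python) =====
-- def koch_turns(n):
--     one_iteration = [60, -120, 60]
--     turns = list()
--     new_turns = list()
--     while n > 0:
--         for elem in turns:
--             new_turns.extend(one_iteration)
--             new_turns.append(elem)
--         new_turns.extend(one_iteration)
--         turns = new_turns
--         new_turns = list()
--         n -= 1
--     return turns
-- ===== SOURCE B (Python) =====
-- def koch_turns(n):
--     if n <= 0:
--         return []
--     sub = koch_turns(n - 1)
--     return sub + [60] + sub + [-120] + sub + [60] + sub
-- ===== Notes on version B (the rewrite author's own statement) =====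
-- stated objective: simpler
-- what changed: Replaced the iterative rewrite loop with two accumulator lists by a direct recursion on the self-similar structure: koch_turns(n) = s + [60] + s + [-120] + s + [60] + s with s = koch_turns(n-1), base [] for n <= 0.
import Mathlib
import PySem

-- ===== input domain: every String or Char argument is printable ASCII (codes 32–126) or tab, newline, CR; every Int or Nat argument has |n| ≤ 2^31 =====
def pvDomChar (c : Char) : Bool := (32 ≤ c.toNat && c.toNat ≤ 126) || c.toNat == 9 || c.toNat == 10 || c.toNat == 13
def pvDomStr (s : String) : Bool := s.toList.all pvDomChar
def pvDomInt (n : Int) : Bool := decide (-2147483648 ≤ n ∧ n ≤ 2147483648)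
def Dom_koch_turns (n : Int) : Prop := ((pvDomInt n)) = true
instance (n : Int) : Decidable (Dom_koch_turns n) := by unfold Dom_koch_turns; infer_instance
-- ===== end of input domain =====

-- B replaces A's iterative rewrite loop with a direct recursion on the Koch self-similar structure (simpler decomposition; return value only).

-- ===== PORT A =====
-- one iteration of the rewrite: for elem in turns: new += one_iteration; new += [elem]; then new += one_iteration
def kochStepA (turns : List Int) : List Int :=
  (turns.foldl (fun acc elem => (acc ++ [60, -120, 60]) ++ [elem]) []) ++ [60, -120, 60]

-- the while n > 0 loop, carrying turns
def kochLoopA (n : Int) (turns : List Int) : List Int :=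
  if n > 0 then kochLoopA (n - 1) (kochStepA turns) else turns
termination_by n.toNat
decreasing_by omega

def koch_turns (n : Int) : List Int := kochLoopA n []

-- ===== PORT B =====
def koch_turns_alt (n : Int) : List Int :=
  if n ≤ 0 then []
  else
    let sub := koch_turns_alt (n - 1)
    sub ++ [60] ++ sub ++ [-120] ++ sub ++ [60] ++ sub
termination_by n.toNat
decreasing_by omega

-- ===== PRECONDITION & SPEC =====
def Spec_koch_turns (n : Int) (out : List Int) : Prop := out = koch_turns_alt n
instance (n : Int) (out : List Int) : Decidable (Spec_koch_turns n out) := by unfold Spec_koch_turns; infer_instance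

-- ===== CLAIM (what is proved, stated in full; the proofs are below) =====
def Claim_equal_koch_turns : Prop := ∀ (n : Int), Dom_koch_turns n → Spec_koch_turns n (koch_turns n)

-- ===== LEMMAS AND PROOFS =====

-- the Koch sequence by level (Nat-indexed version of B's recursion)
def kochS : Nat → List Int
  | 0 => []
  | k + 1 => kochS k ++ [60] ++ kochS k ++ [-120] ++ kochS k ++ [60] ++ kochS k

theorem kochStepA_eq_flatMap (t : List Int) :
    kochStepA t = (t.flatMap (fun e => [60, -120, 60, e])) ++ [60, -120, 60] := by
  unfold kochStepA
  have h : ∀ (acc : List Int),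
      t.foldl (fun acc elem => (acc ++ [60, -120, 60]) ++ [elem]) acc
        = acc ++ t.flatMap (fun e => [60, -120, 60, e]) := by
    induction t with
    | nil => simp
    | cons a t ih => intro acc; simp [List.foldl, List.flatMap]
  simp [List.flatMap]

theorem kochStepA_append_single (x y : List Int) (a : Int) :
    kochStepA (x ++ [a] ++ y) = kochStepA x ++ [a] ++ kochStepA y := by
  simp [kochStepA_eq_flatMap]

theorem kochStepA_kochS (k : Nat) : kochStepA (kochS k) = kochS (k + 1) := by
  induction k with
  | zero => simp [kochS, kochStepA_eq_flatMap]
  | succ k ih =>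
      show kochStepA (kochS (k+1)) = kochS (k+2)
      have h1 : kochS (k+1)
          = kochS k ++ [(60 : Int)] ++ (kochS k ++ [-120] ++ kochS k ++ [60] ++ kochS k) := by
        simp [kochS]
      have h2 : kochS k ++ [(-120 : Int)] ++ kochS k ++ [60] ++ kochS k
          = kochS k ++ [(-120 : Int)] ++ (kochS k ++ [60] ++ kochS k) := by simp
      calc kochStepA (kochS (k+1))
          = kochStepA (kochS k) ++ [60] ++ kochStepA (kochS k ++ [-120] ++ kochS k ++ [60] ++ kochS k) := by
            rw [h1, kochStepA_append_single]
        _ = kochStepA (kochS k) ++ [60] ++ (kochStepA (kochS k) ++ [-120] ++ kochStepA (kochS k ++ [60] ++ kochS k)) := by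
            rw [h2, kochStepA_append_single]
        _ = kochStepA (kochS k) ++ [60] ++ (kochStepA (kochS k) ++ [-120] ++ (kochStepA (kochS k) ++ [60] ++ kochStepA (kochS k))) := by
            rw [kochStepA_append_single]
        _ = kochS (k+2) := by rw [ih]; simp [kochS]

theorem kochLoopA_step (n : Int) (t : List Int) :
    kochLoopA n (kochStepA t) = kochStepA (kochLoopA n t) := by
  by_cases h : n > 0
  · have hk : n.toNat = (n - 1).toNat + 1 := by omega
    conv_lhs => rw [kochLoopA]
    conv_rhs => rw [kochLoopA]
    rw [if_pos h, if_pos h]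
    exact kochLoopA_step (n - 1) (kochStepA t)
  · conv_lhs => rw [kochLoopA]
    conv_rhs => rw [kochLoopA]
    rw [if_neg h, if_neg h]
termination_by n.toNat
decreasing_by omega

theorem kochLoopA_nil (n : Int) : kochLoopA n [] = kochS n.toNat := by
  by_cases h : n > 0
  · have hk : n.toNat = (n - 1).toNat + 1 := by omega
    rw [kochLoopA, if_pos h, kochLoopA_step, kochLoopA_nil (n - 1), kochStepA_kochS, hk]
  · have hk : n.toNat = 0 := by omega
    rw [kochLoopA, if_neg h, hk, kochS]
termination_by n.toNat
decreasing_by omega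

theorem alt_eq_kochS (n : Int) : koch_turns_alt n = kochS n.toNat := by
  by_cases h : n ≤ 0
  · have hk : n.toNat = 0 := by omega
    rw [koch_turns_alt, if_pos h, hk, kochS]
  · have hk : n.toNat = (n - 1).toNat + 1 := by omega
    rw [koch_turns_alt, if_neg h, alt_eq_kochS (n - 1), hk]
    simp [kochS]
termination_by n.toNat
decreasing_by omega

-- ===== VERDICT (by name: the statement is the Claim_ definition above) =====
theorem koch_turns_spec : Claim_equal_koch_turns := by
  intro n _
  unfold Spec_koch_turns koch_turns
  rw [kochLoopA_nil, alt_eq_kochS]
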